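-- pv_equiv track=rewrite | github.com/DexterHK/codons-Visualizer | backend/utils/properties_utils.py | shift_sequence_transform
-- ===== SOURCE A (Python) =====
-- def shift_sequence_transform(tuples, shift_amount):
--     """
--     Implements the ShiftSequence transformation from GCAT.
--     Joins tuples, shifts the string, then splits back into tuples.
--     """
--     # Join tuples with spaces (like Tuple.joinTuples)
--     joined = ' '.join(tuples)
--
--     # Apply shift transformation (shift_amount times)
--     for _ in range(shift_amount):
--         # Pattern A: (\\s)(\\S) -> $2$1 (swap space with next non-space)
--         # Pattern B: ^(\\S)(.*)$ -> $2$1 (move first char to end)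
--
--         # First, swap spaces with following non-space characters
--         result = ""
--         i = 0
--         while i < len(joined):
--             if i < len(joined) - 1 and joined[i] == ' ' and joined[i + 1] != ' ':
--                 # Swap space with next character
--                 result += joined[i + 1] + joined[i]
--                 i += 2
--             else:
--                 result += joined[i]
--                 i += 1
--
--         # Then move first character to end if it's not a space
--         if result and result[0] != ' ':
--             result = result[1:] + result[0]
--
--         joined = result
--
--     # Split back into tuples (like Tuple.splitTuples)
--     return joined.split()
-- ===== SOURCE B (Python) =====
-- def _shift_once(s):
--     """One ShiftSequence step: swap each space with the following non-space,
--     then move a non-space first character to the end."""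
--     cs = []
--     i = 0
--     n = len(s)
--     while i < n:
--         if s[i] == ' ' and i + 1 < n and s[i + 1] != ' ':
--             cs.append(s[i + 1])
--             cs.append(' ')
--             i += 2
--         else:
--             cs.append(s[i])
--             i += 1
--     if cs and cs[0] != ' ':
--         cs.append(cs.pop(0))
--     return ''.join(cs)
--
--
-- def shift_sequence_transform(tuples, shift_amount):
--     """
--     Cycle-skipping ShiftSequence: the step orbit of the joined string is
--     eventually periodic, so memoize the states seen and, on the first repeat,
--     jump straight to the final state by modular arithmetic instead of
--     performing all shift_amount iterations.
--     """
--     joined = ' '.join(tuples)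
--     seen = {}
--     states = []
--     cur = joined
--     k = 0
--     while k < shift_amount:
--         if cur in seen:
--             first = seen[cur]
--             cur = states[first + (shift_amount - k) % (k - first)]
--             break
--         seen[cur] = k
--         states.append(cur)
--         cur = _shift_once(cur)
--         k += 1
--     return cur.split()
-- ===== Notes on version B (the rewrite author's own statement) =====
-- stated objective: faster
-- what changed: B replaces A's blind shift_amount-fold repetition of the swap-and-rotate step by memoized iteration with cycle detection: it stores the states seen and, on the first repeated state, jumps directly to the final state by modular arithmetic, so the work is bounded by the orbit length instead of shift_amount.
import Mathlib
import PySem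

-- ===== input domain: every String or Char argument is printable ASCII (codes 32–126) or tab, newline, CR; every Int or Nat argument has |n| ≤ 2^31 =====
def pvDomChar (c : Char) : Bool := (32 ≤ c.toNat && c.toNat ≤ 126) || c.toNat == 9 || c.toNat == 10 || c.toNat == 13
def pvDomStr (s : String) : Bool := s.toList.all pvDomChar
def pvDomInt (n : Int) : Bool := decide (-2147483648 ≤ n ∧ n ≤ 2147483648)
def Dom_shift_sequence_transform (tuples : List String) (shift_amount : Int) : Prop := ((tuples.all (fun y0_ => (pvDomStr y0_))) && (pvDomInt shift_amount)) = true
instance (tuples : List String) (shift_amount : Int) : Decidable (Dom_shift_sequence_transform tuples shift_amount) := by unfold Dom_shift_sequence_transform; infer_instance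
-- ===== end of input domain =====

-- B memoizes the step orbit of the joined string and, on the first repeated state, jumps to the
-- final state by modular arithmetic instead of performing all shift_amount iterations.

-- ===== PORT A =====
-- the inner while loop of A: swap each space with the following non-space character
def pvSwapPassA : List Char → List Char
  | [] => []
  | [c] => [c]
  | a :: b :: rest =>
    if a = ' ' ∧ b ≠ ' ' then b :: a :: pvSwapPassA rest
    else a :: pvSwapPassA (b :: rest)

-- one iteration of A's for-loop body: swap pass, then move a non-space first char to the end
def pvStepA (s : List Char) : List Char :=
  match pvSwapPassA s with
  | [] => []
  | c :: rest => if c ≠ ' ' then rest ++ [c] else c :: rest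

def shift_sequence_transform (tuples : List String) (shift_amount : Int) : List String :=
  -- joined = ' '.join(tuples); for _ in range(shift_amount): joined = step(joined); joined.split()
  let joined := PySem.Chars.join [' '] (tuples.map String.toList)
  (PySem.Chars.split₀ (pvStepA^[shift_amount.toNat] joined)).map String.ofList

-- ===== PORT B =====
-- Source B's _shift_once: the while loop collecting chars into cs …
def pvSwapB : List Char → List Char
  | [] => []
  | [a] => [a]
  | a :: b :: rest =>
    if a = ' ' ∧ b ≠ ' ' then b :: ' ' :: pvSwapB rest
    else a :: pvSwapB (b :: rest)

-- … then cs.append(cs.pop(0)) when the first collected char is not a space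
def pvShiftOnceB (s : List Char) : List Char :=
  match pvSwapB s with
  | [] => []
  | c :: rest => if c ≠ ' ' then rest ++ [c] else c :: rest

-- Source B's while loop: memoized iteration with a modular jump on the first repeated state
def pvLoopB (shift : Int) (seen : PySem.Dict (List Char) Int) (states : List (List Char))
    (cur : List Char) (k : Int) : List Char :=
  if _h : k < shift then
    match PySem.Dict.get? seen cur with
    | some first =>
      -- cur = states[first + (shift - k) % (k - first)]; break
      -- (the index is in range whenever this lookup can hit, as the proof below shows,
      --  so the .getD default is never taken)
      (PySem.List.pyGet? states (first + PySem.Int.mod (shift - k) (k - first))).getD []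
    | none =>
      pvLoopB shift (seen.insert cur k) (states ++ [cur]) (pvShiftOnceB cur) (k + 1)
  else cur
termination_by (shift - k).toNat
decreasing_by omega

def shift_sequence_transform_alt (tuples : List String) (shift_amount : Int) : List String :=
  let joined := PySem.Chars.join [' '] (tuples.map String.toList)
  (PySem.Chars.split₀ (pvLoopB shift_amount PySem.Dict.empty [] joined 0)).map String.ofList

-- ===== PRECONDITION & SPEC =====
def Spec_shift_sequence_transform (tuples : List String) (shift_amount : Int) (out : List String) : Prop := out = shift_sequence_transform_alt tuples shift_amount
instance (tuples : List String) (shift_amount : Int) (out : List String) : Decidable (Spec_shift_sequence_transform tuples shift_amount out) := by unfold Spec_shift_sequence_transform; infer_instance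

-- ===== CLAIM (what is proved, stated in full; the proofs are below) =====
def Claim_equal_shift_sequence_transform : Prop := ∀ (tuples : List String) (shift_amount : Int), Dom_shift_sequence_transform tuples shift_amount → Spec_shift_sequence_transform tuples shift_amount (shift_sequence_transform tuples shift_amount)

-- ===== LEMMAS AND PROOFS =====

-- B's step is A's step (Source B writes the literal ' ' where A copies the space it just matched)
theorem pvSwapB_eq_pvSwapPassA : ∀ s, pvSwapB s = pvSwapPassA s := by
  intro s
  induction s using pvSwapPassA.induct with
  | case1 => rfl
  | case2 c => rfl
  | case3 a b rest h ih =>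
    simp only [pvSwapB, pvSwapPassA]
    rw [if_pos h, if_pos h, ih, h.1]
  | case4 a b rest h ih =>
    simp only [pvSwapB, pvSwapPassA]
    rw [if_neg h, if_neg h, ih]

theorem pvShiftOnceB_eq_pvStepA (s : List Char) : pvShiftOnceB s = pvStepA s := by
  unfold pvShiftOnceB pvStepA
  rw [pvSwapB_eq_pvSwapPassA]

-- once the orbit of f repeats (f^[a+p] x = f^[a] x), indices past a may be reduced mod p
theorem pvIterate_mod {α : Type} (f : α → α) (x : α) (a p : Nat) (hp : 0 < p)
    (hcyc : f^[a + p] x = f^[a] x) : ∀ m, f^[a + m] x = f^[a + m % p] x := by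
  intro m
  induction m using Nat.strong_induction_on with
  | _ m ih =>
    by_cases hm : m < p
    · rw [Nat.mod_eq_of_lt hm]
    · have h1 : f^[a + m] x = f^[a + (m - p)] x := by
        have : a + m = (m - p) + (a + p) := by omega
        rw [this, Function.iterate_add_apply, hcyc, ← Function.iterate_add_apply]
        congr 1
        omega
      rw [h1, ih (m - p) (by omega)]
      have hmod : (m - p) % p = m % p := by
        conv_rhs => rw [show m = (m - p) + p by omega]
        rw [Nat.add_mod_right]
      rw [hmod]

-- loop invariant: cur is the k-th iterate, states lists the iterates 0..k-1,
-- and every dict entry (s, i) records an earlier iterate equal to s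
theorem pvLoopB_eq_iterate (shift : Int) :
    ∀ (k : Int) (seen : PySem.Dict (List Char) Int) (states : List (List Char)) (s0 : List Char),
      0 ≤ k → (k ≤ shift ∨ k = 0) →
      states.length = k.toNat →
      (∀ m : Nat, m < k.toNat → states[m]? = some (pvStepA^[m] s0)) →
      (∀ s i, PySem.Dict.get? seen s = some i → 0 ≤ i ∧ i < k ∧ pvStepA^[i.toNat] s0 = s) →
      pvLoopB shift seen states (pvStepA^[k.toNat] s0) k = pvStepA^[shift.toNat] s0 := by
  intro k seen states s0 hk0 hkle hlen hstates hseen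
  rw [pvLoopB]
  split
  case isFalse h =>
    -- k ≥ shift: the loop never ran past its bound, so k = max(shift, 0)
    have : k.toNat = shift.toNat := by omega
    rw [this]
  case isTrue h =>
    split
    case h_1 first hget =>
      obtain ⟨hf0, hfk, hfs⟩ := hseen _ _ hget
      -- Nat shadows of the Int quantities
      set a := first.toNat with ha
      set b := k.toNat with hb
      have hab : a < b := by omega
      have hidx : first + PySem.Int.mod (shift - k) (k - first)
          = ((a + (shift.toNat - b) % (b - a) : Nat) : Int) := by
        have h1 : shift - k = ((shift.toNat - b : Nat) : Int) := by omega
        have h2 : k - first = ((b - a : Nat) : Int) := by omega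
        rw [h1, h2, PySem.Int.mod_natCast]
        omega
      have hcyc : pvStepA^[a + (b - a)] s0 = pvStepA^[a] s0 := by
        rw [show a + (b - a) = b by omega]
        exact hfs ▸ rfl
      have hper := pvIterate_mod pvStepA s0 a (b - a) (by omega) hcyc
      set idx : Nat := a + (shift.toNat - b) % (b - a) with hidxdef
      have hidxlt : idx < states.length := by
        have := Nat.mod_lt (shift.toNat - b) (y := b - a) (by omega)
        omega
      have hval : pvStepA^[idx] s0 = pvStepA^[shift.toNat] s0 := by
        have hs : shift.toNat = a + (shift.toNat - a) := by omega
        rw [hs, hper (shift.toNat - a)]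
        have : (shift.toNat - a) % (b - a) = (shift.toNat - b) % (b - a) := by
          have hrw : shift.toNat - a = (shift.toNat - b) + (b - a) := by omega
          rw [hrw, Nat.add_mod_right]
        rw [this]
      rw [hidx, PySem.List.pyGet?_natCast, hstates idx (by omega), Option.getD_some, hval]
    case h_2 hget =>
      rw [pvShiftOnceB_eq_pvStepA, ← Function.iterate_succ_apply' pvStepA]
      have hk1 : (k + 1).toNat = k.toNat + 1 := by omega
      have := pvLoopB_eq_iterate shift (k + 1)
        (seen.insert (pvStepA^[k.toNat] s0) k) (states ++ [pvStepA^[k.toNat] s0])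
        s0 (by omega) (by omega) (by simp [hlen]; omega) ?_ ?_
      · rw [hk1] at this
        exact this
      · intro m hm
        rw [hk1] at hm
        rcases Nat.lt_succ_iff_lt_or_eq.mp hm with hlt | heq
        · rw [List.getElem?_append_left (by omega), hstates m hlt]
        · subst heq
          rw [← hlen, List.getElem?_append_right (le_refl _)]
          simp
      · intro s i hsi
        rw [PySem.Dict.get?_insert] at hsi
        split at hsi
        · rename_i hseq
          obtain rfl := Option.some_injective _ hsi
          exact ⟨hk0, by omega, by rw [hseq]⟩
        · obtain ⟨h1, h2, h3⟩ := hseen s i hsi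
          exact ⟨h1, by omega, h3⟩
termination_by k => (shift - k).toNat
decreasing_by omega

-- ===== VERDICT (by name: the statement is the Claim_ definition above) =====
theorem shift_sequence_transform_spec : Claim_equal_shift_sequence_transform := by
  intro tuples shift_amount _hdom
  unfold Spec_shift_sequence_transform
  simp only [shift_sequence_transform, shift_sequence_transform_alt]
  have := pvLoopB_eq_iterate shift_amount 0 PySem.Dict.empty []
    (PySem.Chars.join [' '] (tuples.map String.toList))
    (by omega) (by omega) (by simp) (by intro m hm; simp at hm)
    (by intro s i hsi; rw [PySem.Dict.get?_empty] at hsi; cases hsi)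
  rw [show (Int.toNat 0 : Nat) = 0 from rfl, Function.iterate_zero_apply] at this
  rw [this]
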